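-- pv_equiv track=rewrite | github.com/Rohanpatel4/COSC410-2025-AutoGrader | infra/judge0/integration_bridge/split_tests.py | _collect_import_lines
-- ===== SOURCE A (Python) =====
-- def _collect_import_lines(lines: list[str]) -> list[str]:
--     """Keep simple import lines to recreate the test context in each harness."""
--     imports: list[str] = []
--     for line in lines:
--         s = line.strip()
--         # stop collecting imports once we hit the first non-empty, non-import line
--         if not s:
--             continue
--         if s.startswith("import ") or s.startswith("from "):
--             imports.append(line)
--         else:
--             # assume imports are grouped at the top; break on first non-import
--             break
--     return imports
-- ===== SOURCE B (Python) =====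
-- def _collect_import_lines(lines: list[str]) -> list[str]:
--     """Keep simple import lines to recreate the test context in each harness."""
--     def _is_prefix_line(line: str) -> bool:
--         s = line.strip()
--         return not s or s.startswith(("import ", "from "))
--
--     stop = next((i for i, line in enumerate(lines) if not _is_prefix_line(line)),
--                 len(lines))
--     return [line for line in lines[:stop] if line.strip()]
-- ===== Notes on version B (the rewrite author's own statement) =====
-- stated objective: idiomatic
-- what changed: Replaces the single loop with break/continue/accumulator by two phases: first find the end of the leading prefix of blank/import lines (next over enumerate), then keep the non-blank lines of that prefix with a comprehension.
import Mathlib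
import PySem

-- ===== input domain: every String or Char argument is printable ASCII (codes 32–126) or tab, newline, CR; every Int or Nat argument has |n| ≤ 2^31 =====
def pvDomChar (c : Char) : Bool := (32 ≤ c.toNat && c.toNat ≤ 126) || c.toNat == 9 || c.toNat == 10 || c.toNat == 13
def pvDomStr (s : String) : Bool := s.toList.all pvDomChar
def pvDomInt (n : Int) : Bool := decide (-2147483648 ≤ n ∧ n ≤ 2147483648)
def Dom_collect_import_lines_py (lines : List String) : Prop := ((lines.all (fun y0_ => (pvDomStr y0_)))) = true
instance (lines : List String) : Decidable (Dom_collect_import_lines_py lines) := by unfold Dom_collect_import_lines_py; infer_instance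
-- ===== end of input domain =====

-- B: two phases (find end of blank/import prefix, then filter non-blank) instead of A's single loop with break/continue; idiomatic, same cost.
-- ===== PORT A =====
def collect_import_lines_py_go (acc : List String) : List String → List String
  | [] => acc
  | line :: rest =>
    let s := PySem.Str.strip line
    if s = "" then collect_import_lines_py_go acc rest
    else if PySem.Str.startswith s "import " || PySem.Str.startswith s "from " then
      collect_import_lines_py_go (acc ++ [line]) rest
    else acc

def collect_import_lines_py (lines : List String) : List String :=
  collect_import_lines_py_go [] lines

-- ===== PORT B =====
def pvIsPrefixLine (line : String) : Bool :=
  let s := PySem.Str.strip line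
  (s = "") || PySem.Str.startswith s "import " || PySem.Str.startswith s "from "

def collect_import_lines_py_alt (lines : List String) : List String :=
  let stop := (lines.findIdx? (fun l => !pvIsPrefixLine l)).getD lines.length
  (lines.take stop).filter (fun l => PySem.Str.strip l != "")

-- ===== PRECONDITION & SPEC =====
def Spec_collect_import_lines_py (lines : List String) (out : List String) : Prop := out = collect_import_lines_py_alt lines
instance (lines : List String) (out : List String) : Decidable (Spec_collect_import_lines_py lines out) := by unfold Spec_collect_import_lines_py; infer_instance

-- ===== CLAIM (what is proved, stated in full; the proofs are below) =====
def Claim_equal_collect_import_lines_py : Prop := ∀ (lines : List String), Dom_collect_import_lines_py lines → Spec_collect_import_lines_py lines (collect_import_lines_py lines)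

-- ===== LEMMAS AND PROOFS =====

-- ===== VERDICT (by name: the statement is the Claim_ definition above) =====
lemma alt_cons (l : String) (rest : List String) :
    collect_import_lines_py_alt (l :: rest) =
      if pvIsPrefixLine l then
        (if PySem.Str.strip l = "" then collect_import_lines_py_alt rest
         else l :: collect_import_lines_py_alt rest)
      else [] := by
  by_cases hp : pvIsPrefixLine l
  · cases h : rest.findIdx? (fun x => !pvIsPrefixLine x) with
    | none =>
        simp [collect_import_lines_py_alt, List.findIdx?_cons, hp, h, List.filter]
        by_cases hs : PySem.Str.strip l = ""
        · simp [bne, hs]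
        · have hfe : (PySem.Str.strip l == "") = false := beq_eq_false_iff_ne.mpr hs
          simp [bne, hs, hfe]
    | some i =>
        simp [collect_import_lines_py_alt, List.findIdx?_cons, hp, h, List.filter]
        by_cases hs : PySem.Str.strip l = ""
        · simp [bne, hs]
        · have hfe : (PySem.Str.strip l == "") = false := beq_eq_false_iff_ne.mpr hs
          simp [bne, hs, hfe]
  · simp [collect_import_lines_py_alt, List.findIdx?_cons, hp]

lemma go_eq (lines : List String) : ∀ acc,
    collect_import_lines_py_go acc lines = acc ++ collect_import_lines_py_alt lines := by
  induction lines with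
  | nil => intro acc; simp [collect_import_lines_py_go, collect_import_lines_py_alt]
  | cons l rest ih =>
    intro acc
    rw [alt_cons]
    by_cases hs : PySem.Str.strip l = ""
    · have hp : pvIsPrefixLine l = true := by simp [pvIsPrefixLine, hs]
      simp [collect_import_lines_py_go, hs, hp, ih]
    · by_cases hi : (PySem.Str.startswith (PySem.Str.strip l) "import "
          || PySem.Str.startswith (PySem.Str.strip l) "from ") = true
      · have hp : pvIsPrefixLine l = true := by
          simp only [pvIsPrefixLine]
          simp at hi ⊢
          tauto
        have hi' := hi
        simp at hi'
        simp [collect_import_lines_py_go, hs, hp, ih]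
        intro h1
        rcases hi' with h | h
        · simp [h] at h1
        · exact h
      · have hp : pvIsPrefixLine l = false := by
          simp only [pvIsPrefixLine]
          simp at hi ⊢
          tauto
        have hi' := hi
        simp at hi'
        simp [collect_import_lines_py_go, hs, hp]
        intro h
        rcases h with h | h <;> simp [h] at hi'

theorem collect_import_lines_py_spec : Claim_equal_collect_import_lines_py := by
  intro lines _
  unfold Spec_collect_import_lines_py collect_import_lines_py
  simpa using go_eq lines []
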